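-- pv_equiv track=rewrite | github.com/hirona98/OtomeKairo | src/otomekairo/usecase/retrieval_eval.py | _ordered_mode_names
-- ===== SOURCE A (Python) =====
-- from collections.abc import Iterable
-- from typing import Any
--
-- MODE_ORDER = (
--     "explicit_about_time",
--     "reflection_recall",
--     "task_targeted",
--     "associative_recent",
-- )
--
-- def _ordered_mode_names(mode_names: Any) -> list[str]:
--     if not isinstance(mode_names, Iterable):
--         raise RuntimeError("mode_names must be iterable")
--     unique_mode_names = {
--         mode_name
--         for mode_name in mode_names
--         if isinstance(mode_name, str) and mode_name
--     }
--     known_mode_names = [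
--         mode_name
--         for mode_name in MODE_ORDER
--         if mode_name in unique_mode_names
--     ]
--     extra_mode_names = sorted(unique_mode_names - set(MODE_ORDER))
--     return known_mode_names + extra_mode_names
-- ===== SOURCE B (Python) =====
-- from collections.abc import Iterable
-- from typing import Any
--
-- MODE_ORDER = (
--     "explicit_about_time",
--     "reflection_recall",
--     "task_targeted",
--     "associative_recent",
-- )
--
-- _RANK = {name: i for i, name in enumerate(MODE_ORDER)}
--
-- def _ordered_mode_names(mode_names: Any) -> list[str]:
--     if not isinstance(mode_names, Iterable):
--         raise RuntimeError("mode_names must be iterable")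
--     unique_mode_names = {
--         mode_name
--         for mode_name in mode_names
--         if isinstance(mode_name, str) and mode_name
--     }
--     return sorted(unique_mode_names,
--                   key=lambda m: (_RANK.get(m, len(MODE_ORDER)), m))
-- ===== Notes on version B (the rewrite author's own statement) =====
-- stated objective: idiomatic
-- what changed: Replaces A's two-pass construction (filter MODE_ORDER by membership, plus sorted set-difference, then concatenate) with a single sort of the unique names under a composite key (rank from a precomputed MODE_ORDER rank dict, then the name itself).
import Mathlib
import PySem

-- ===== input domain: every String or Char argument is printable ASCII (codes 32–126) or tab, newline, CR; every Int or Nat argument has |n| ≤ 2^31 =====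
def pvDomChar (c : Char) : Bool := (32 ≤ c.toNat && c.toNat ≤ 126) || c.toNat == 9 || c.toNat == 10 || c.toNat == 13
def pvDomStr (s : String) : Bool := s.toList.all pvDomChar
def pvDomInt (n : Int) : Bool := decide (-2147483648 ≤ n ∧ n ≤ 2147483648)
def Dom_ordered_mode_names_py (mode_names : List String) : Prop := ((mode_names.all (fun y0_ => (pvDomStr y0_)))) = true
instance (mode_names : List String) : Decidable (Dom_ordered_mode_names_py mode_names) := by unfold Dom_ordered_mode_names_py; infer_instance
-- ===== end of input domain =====

-- B replaces A's two separate passes (filter over MODE_ORDER + sorted set difference, then concatenation)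
-- by one composite-key sort over a precomputed rank dict (objective: idiomatic; return value unchanged).

def MODE_ORDER : List String :=
  ["explicit_about_time", "reflection_recall", "task_targeted", "associative_recent"]

-- ===== PORT A =====
def ordered_mode_names_py (mode_names : List String) : List String :=
  let unique_mode_names : PySem.Set String :=
    PySem.Set.ofList (mode_names.filter (fun mode_name => decide (mode_name ≠ "")))
  let known_mode_names :=
    MODE_ORDER.filter (fun mode_name => PySem.Set.contains unique_mode_names mode_name)
  let extra_mode_names :=
    PySem.List.sorted (PySem.Set.diff unique_mode_names (PySem.Set.ofList MODE_ORDER)) (fun x => x)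
  known_mode_names ++ extra_mode_names

-- ===== PORT B =====
-- _RANK = {name: i for i, name in enumerate(MODE_ORDER)}
def rankDict : PySem.Dict String Int :=
  (PySem.List.enumerate MODE_ORDER).foldl (fun d p => d.insert p.2 p.1) PySem.Dict.empty

def ordered_mode_names_py_alt (mode_names : List String) : List String :=
  let unique_mode_names : PySem.Set String :=
    PySem.Set.ofList (mode_names.filter (fun mode_name => decide (mode_name ≠ "")))
  PySem.List.sorted2 unique_mode_names
    (fun m => rankDict.getD m (Int.ofNat MODE_ORDER.length)) (fun m => m)

-- ===== PRECONDITION & SPEC =====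
def Spec_ordered_mode_names_py (mode_names : List String) (out : List String) : Prop := out = ordered_mode_names_py_alt mode_names
instance (mode_names : List String) (out : List String) : Decidable (Spec_ordered_mode_names_py mode_names out) := by unfold Spec_ordered_mode_names_py; infer_instance

-- ===== CLAIM (what is proved, stated in full; the proofs are below) =====
def Claim_equal_ordered_mode_names_py : Prop := ∀ (mode_names : List String), Dom_ordered_mode_names_py mode_names → Spec_ordered_mode_names_py mode_names (ordered_mode_names_py mode_names)

-- ===== LEMMAS AND PROOFS =====

-- the composite key of B's sort, as one lexicographic key
def lexKey (m : String) : Lex (Int × String) :=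
  toLex (rankDict.getD m (Int.ofNat MODE_ORDER.length), m)

theorem before_eq {α : Type} (k1 : α → Int) (k2 : α → String) (a b : α) :
    (decide (k1 a < k1 b) || (!decide (k1 b < k1 a) && decide (k2 a < k2 b)))
    = decide (toLex (k1 a, k2 a) < toLex (k1 b, k2 b)) := by
  rcases lt_trichotomy (k1 a) (k1 b) with h|h|h
  · simp [Prod.Lex.toLex_lt_toLex, h]
  · simp [Prod.Lex.toLex_lt_toLex, h]
  · have h1 : ¬ k1 a < k1 b := not_lt_of_gt h
    have h2 : k1 a ≠ k1 b := ne_of_gt h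
    simp only [Prod.Lex.toLex_lt_toLex]
    simp [h, h1, h2]

theorem sorted2_lex {α : Type} (xs : List α) (k1 : α → Int) (k2 : α → String) :
    PySem.List.sorted2 xs k1 k2 = PySem.List.sorted xs (fun x => toLex (k1 x, k2 x)) := by
  rw [PySem.List.sorted_eq_foldl_insertBy]
  simp only [PySem.List.sorted2]
  congr 1
  funext acc x
  congr 1
  funext a b
  exact before_eq k1 k2 a b

theorem rankDict_keys : rankDict.keys = MODE_ORDER := by decide

theorem rank_of_not_mem {m : String} (hm : m ∉ MODE_ORDER) :
    rankDict.getD m (Int.ofNat MODE_ORDER.length) = 4 := by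
  have h : rankDict.get? m = none :=
    (PySem.Dict.get?_eq_none_iff_not_mem_keys rankDict m).2 (by rw [rankDict_keys]; exact hm)
  simp [PySem.Dict.getD, h, MODE_ORDER]

theorem rank_of_mem : ∀ m ∈ MODE_ORDER, rankDict.getD m (Int.ofNat MODE_ORDER.length) < 4 := by
  decide

theorem rank_pairwise_mode_order :
    List.Pairwise (fun a b => rankDict.getD a (Int.ofNat MODE_ORDER.length)
      < rankDict.getD b (Int.ofNat MODE_ORDER.length)) MODE_ORDER := by
  decide

theorem ordered_mode_names_py_spec : Claim_equal_ordered_mode_names_py := by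
  intro mode_names _
  unfold Spec_ordered_mode_names_py ordered_mode_names_py ordered_mode_names_py_alt
  simp only []
  set U : PySem.Set String :=
    PySem.Set.ofList (mode_names.filter (fun mode_name => decide (mode_name ≠ ""))) with hUdef
  have hnodupU : U.Nodup := PySem.Set.nodup_ofList _
  set known := MODE_ORDER.filter (fun mode_name => PySem.Set.contains U mode_name) with hknown
  set extras := PySem.List.sorted (PySem.Set.diff U (PySem.Set.ofList MODE_ORDER)) (fun x => x)
    with hextras
  rw [sorted2_lex]
  -- membership characterisations
  have hmem_known : ∀ x, x ∈ known ↔ x ∈ MODE_ORDER ∧ x ∈ U := by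
    intro x
    simp [hknown, List.mem_filter]
  have hmem_extras : ∀ x, x ∈ extras ↔ x ∈ U ∧ x ∉ MODE_ORDER := by
    intro x
    rw [hextras, PySem.List.mem_sorted, PySem.Set.mem_diff, PySem.Set.mem_ofList]
    simp [PySem.Set.mem_ofList]
  -- permutation: known ++ extras is a rearrangement of U
  have hMOnodup : MODE_ORDER.Nodup := by decide
  have hperm1 : known.Perm (U.filter (fun m => MODE_ORDER.contains m)) := by
    rw [List.perm_ext_iff_of_nodup (hMOnodup.filter _) (hnodupU.filter _)]
    intro x
    rw [hmem_known x]
    simp [List.mem_filter]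
    tauto
  have hperm2 : extras.Perm (U.filter (fun m => !MODE_ORDER.contains m)) := by
    have h1 : extras.Perm (PySem.Set.diff U (PySem.Set.ofList MODE_ORDER)) := by
      rw [hextras]; exact PySem.List.sorted_perm _ _ _
    refine h1.trans ?_
    rw [List.perm_ext_iff_of_nodup (PySem.Set.nodup_diff _ _ hnodupU) (hnodupU.filter _)]
    intro x
    rw [PySem.Set.mem_diff, PySem.Set.mem_ofList]
    simp [hUdef, List.mem_filter, PySem.Set.mem_ofList]
  have hperm : (known ++ extras).Perm U :=
    (hperm1.append hperm2).trans (List.filter_append_perm _ U)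
  -- strict key increase along known ++ extras
  have hpw : List.Pairwise (fun a b => lexKey a < lexKey b) (known ++ extras) := by
    rw [List.pairwise_append]
    refine ⟨?_, ?_, ?_⟩
    · exact (rank_pairwise_mode_order.filter _).imp
        (fun h => Prod.Lex.toLex_lt_toLex.mpr (Or.inl h))
    · have hnodupE : extras.Nodup := by
        rw [hextras]
        exact ((PySem.List.sorted_perm _ _ _).nodup_iff).2 (PySem.Set.nodup_diff _ _ hnodupU)
      have hle : List.Pairwise (fun a b : String => a ≤ b) extras := by
        have := PySem.List.sorted_pairwise (PySem.Set.diff U (PySem.Set.ofList MODE_ORDER))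
          (fun x => x)
        simpa [hextras] using this
      refine (hle.and hnodupE).imp_of_mem ?_
      intro a b ha hb h
      have hna : a ∉ MODE_ORDER := ((hmem_extras a).1 ha).2
      have hnb : b ∉ MODE_ORDER := ((hmem_extras b).1 hb).2
      refine Prod.Lex.toLex_lt_toLex.mpr (Or.inr ⟨?_, lt_of_le_of_ne h.1 h.2⟩)
      rw [rank_of_not_mem hna, rank_of_not_mem hnb]
    · intro a ha b hb
      have haM : a ∈ MODE_ORDER := ((hmem_known a).1 ha).1
      have hnb : b ∉ MODE_ORDER := ((hmem_extras b).1 hb).2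
      refine Prod.Lex.toLex_lt_toLex.mpr (Or.inl ?_)
      rw [rank_of_not_mem hnb]
      exact rank_of_mem a haM
  exact (PySem.List.sorted_eq_of_perm_of_pairwise_lt U (known ++ extras) lexKey hperm hpw).symm
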